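-- pv_equiv track=rewrite | github.com/webxni/MIAF | apps/api/app/services/telegram.py | _business_category_to_code
-- ===== SOURCE A (Python) =====
-- def _business_category_to_code(text: str) -> str:
--     normalized = text.lower()
--     if "rent" in normalized or "alquiler" in normalized:
--         return "6100"
--     if any(token in normalized for token in ["utility", "utilities", "water", "electric", "luz"]):
--         return "6200"
--     if any(token in normalized for token in ["internet", "phone", "telefono"]):
--         return "6300"
--     if any(token in normalized for token in ["salary", "wage", "payroll", "nomina"]):
--         return "6400"
--     if any(token in normalized for token in ["office", "supplies", "papeleria"]):
--         return "6500"
--     return "6900"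
-- ===== SOURCE B (Python) =====
-- TOKEN_CODES = {
--     "rent": "6100", "alquiler": "6100",
--     "utility": "6200", "utilities": "6200", "water": "6200",
--     "electric": "6200", "luz": "6200",
--     "internet": "6300", "phone": "6300", "telefono": "6300",
--     "salary": "6400", "wage": "6400", "payroll": "6400", "nomina": "6400",
--     "office": "6500", "supplies": "6500", "papeleria": "6500",
-- }
--
--
-- def _business_category_to_code(text: str) -> str:
--     # Priority order of A's branch chain coincides with ascending code order,
--     # so the highest-priority matching rule is simply the minimum matching code.
--     normalized = text.lower()
--     return min(
--         (code for token, code in TOKEN_CODES.items() if token in normalized),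
--         default="6900",
--     )
-- ===== Notes on version B (the rewrite author's own statement) =====
-- stated objective: alternative
-- what changed: Instead of a prioritized first-match branch chain, B flattens the rules into a token-to-code map, collects ALL matching codes, and returns their minimum (default '6900'); correct because rule priority coincides with ascending code order.
import Mathlib
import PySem

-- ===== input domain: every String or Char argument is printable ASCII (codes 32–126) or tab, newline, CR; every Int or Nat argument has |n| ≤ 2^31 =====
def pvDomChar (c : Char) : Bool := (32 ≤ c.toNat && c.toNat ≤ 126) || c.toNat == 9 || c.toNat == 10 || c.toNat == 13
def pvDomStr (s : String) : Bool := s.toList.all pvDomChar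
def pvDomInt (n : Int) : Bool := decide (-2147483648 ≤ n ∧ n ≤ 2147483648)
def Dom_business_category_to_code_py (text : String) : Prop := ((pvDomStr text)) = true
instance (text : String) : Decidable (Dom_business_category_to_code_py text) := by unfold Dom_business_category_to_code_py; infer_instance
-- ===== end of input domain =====

set_option maxHeartbeats 1000000

-- B replaces A's prioritized branch chain by "minimum of all matching codes" over a flat
-- token→code map (alternative algorithm; correct since priority order = ascending code order).

-- ===== PORT A =====
def business_category_to_code_py (text : String) : String :=
  let normalized := PySem.Str.lower text
  if PySem.Str.isIn "rent" normalized || PySem.Str.isIn "alquiler" normalized then "6100"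
  else if (["utility", "utilities", "water", "electric", "luz"].any
      (fun token => PySem.Str.isIn token normalized)) then "6200"
  else if (["internet", "phone", "telefono"].any
      (fun token => PySem.Str.isIn token normalized)) then "6300"
  else if (["salary", "wage", "payroll", "nomina"].any
      (fun token => PySem.Str.isIn token normalized)) then "6400"
  else if (["office", "supplies", "papeleria"].any
      (fun token => PySem.Str.isIn token normalized)) then "6500"
  else "6900"

-- ===== PORT B =====
def pvTokenCodes : List (String × String) :=
  [ ("rent", "6100"), ("alquiler", "6100")
  , ("utility", "6200"), ("utilities", "6200"), ("water", "6200")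
  , ("electric", "6200"), ("luz", "6200")
  , ("internet", "6300"), ("phone", "6300"), ("telefono", "6300")
  , ("salary", "6400"), ("wage", "6400"), ("payroll", "6400"), ("nomina", "6400")
  , ("office", "6500"), ("supplies", "6500"), ("papeleria", "6500") ]

def business_category_to_code_py_alt (text : String) : String :=
  let normalized := PySem.Str.lower text
  let matched := pvTokenCodes.filterMap
    (fun p => if PySem.Str.isIn p.1 normalized then some p.2 else none)
  (PySem.List.min? matched (fun x => x)).getD "6900"

-- ===== PRECONDITION & SPEC =====
def Spec_business_category_to_code_py (text : String) (out : String) : Prop := out = business_category_to_code_py_alt text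
instance (text : String) (out : String) : Decidable (Spec_business_category_to_code_py text out) := by unfold Spec_business_category_to_code_py; infer_instance

-- ===== CLAIM (what is proved, stated in full; the proofs are below) =====
def Claim_equal_business_category_to_code_py : Prop := ∀ (text : String), Dom_business_category_to_code_py text → Spec_business_category_to_code_py text (business_category_to_code_py text)

-- ===== LEMMAS AND PROOFS =====

-- First-match over an ordered rule list: reference shape used only inside the proof.
def pvFirstMatch (n d : String) : List (String × String) → String
  | [] => d
  | (t, c) :: rest => if PySem.Str.isIn t n then c else pvFirstMatch n d rest

theorem pv_if_or (a b : Bool) (x y : String) :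
    (if a = true then x else if b = true then x else y) = if (a || b) = true then x else y := by
  cases a <;> simp

-- When the rule codes are nondecreasing and all ≤ the default, the minimum of the
-- matching codes equals the first matching rule's code.
theorem pv_min_matched_eq_firstMatch (n d : String) (ps : List (String × String))
    (hp : ps.Pairwise (fun a b => a.2 ≤ b.2)) (hd : ∀ p ∈ ps, p.2 ≤ d) :
    (PySem.List.min? (ps.filterMap
        (fun p => if PySem.Str.isIn p.1 n then some p.2 else none)) (fun x => x)).getD d
      = pvFirstMatch n d ps := by
  induction ps with
  | nil =>
    simp only [List.filterMap_nil]
    rw [(PySem.List.min?_eq_none_iff _ _).mpr rfl]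
    rfl
  | cons p rest ih =>
    obtain ⟨t, c⟩ := p
    rcases List.pairwise_cons.mp hp with ⟨hpc, hp'⟩
    by_cases h : PySem.Str.isIn t n
    · have hM : ∀ x ∈ rest.filterMap
          (fun p => if PySem.Str.isIn p.1 n then some p.2 else none), c ≤ x := by
        intro x hx
        obtain ⟨q, hq, hqx⟩ := List.mem_filterMap.mp hx
        have hx2 : x = q.2 := by
          by_cases hq' : PySem.Str.isIn q.1 n
          · rw [if_pos hq'] at hqx; exact (Option.some.inj hqx).symm
          · rw [if_neg hq'] at hqx; exact absurd hqx (by simp)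
        exact hx2 ▸ hpc q hq
      simp only [List.filterMap_cons, h, if_pos, pvFirstMatch]
      rw [PySem.List.min?_id_cons, Option.getD_some]
      rcases PySem.List.foldl_min_mem
          (rest.filterMap (fun p => if PySem.Str.isIn p.1 n then some p.2 else none)) c with
        hm | hm
      · exact hm
      · have h1 := (PySem.List.foldl_min_le
          (rest.filterMap (fun p => if PySem.Str.isIn p.1 n then some p.2 else none)) c).1
        exact le_antisymm h1 (hM _ hm)
    · simp only [List.filterMap_cons, h, pvFirstMatch, Bool.false_eq_true, if_false]
      exact ih hp' (fun q hq => hd q (List.mem_cons_of_mem _ hq))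

-- ===== VERDICT (by name: the statement is the Claim_ definition above) =====
theorem business_category_to_code_py_spec : Claim_equal_business_category_to_code_py := by
  intro text _
  unfold Spec_business_category_to_code_py
  simp only [business_category_to_code_py_alt]
  rw [pv_min_matched_eq_firstMatch _ _ _
      ((by decide : pvTokenCodes.Pairwise (fun a b => a.2.toList ≤ b.2.toList)).imp
        (fun h => String.le_iff_toList_le.mpr h))
      (fun q hq => String.le_iff_toList_le.mpr
        ((by decide : ∀ p ∈ pvTokenCodes, p.2.toList ≤ "6900".toList) q hq))]
  unfold business_category_to_code_py
  simp only [pvTokenCodes, pvFirstMatch, List.any_cons, List.any_nil, Bool.or_false,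
    pv_if_or]
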